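-- pv_equiv track=rewrite | github.com/jcybul/punchcards | app/services/strip_generator.py | calculate_layout
-- ===== SOURCE A (Python) =====
-- import math
--
-- def calculate_layout(punches_required: int):
--     """
--     Calculate optimal layout for given number of punches.
--     Returns: (rows, items_per_row_list)
--
--     Examples:
--     - 8 punches → 2 rows, [4, 4]
--     - 10 punches → 2 rows, [5, 5]
--     - 7 punches → 2 rows, [4, 3]
--     - 12 punches → 2 rows, [6, 6]
--     """
--     if punches_required <= 5:
--         # Single row
--         return 1, [punches_required]
--
--     elif punches_required <= 10:
--         # Two rows, balanced
--         rows = 2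
--         items_per_row = punches_required / 2
--
--         if punches_required % 2 == 0:
--             # Even split: 8 → [4, 4], 10 → [5, 5]
--             return rows, [int(items_per_row), int(items_per_row)]
--         else:
--             # Odd: top row gets one more: 7 → [4, 3], 9 → [5, 4]
--             return rows, [math.ceil(items_per_row), math.floor(items_per_row)]
--
--     elif punches_required <= 15:
--         # Three rows, balanced
--         rows = 3
--         base_items = punches_required // 3
--         extra = punches_required % 3
--
--         # Distribute extras to first rows
--         if extra == 0:
--             return rows, [base_items, base_items, base_items]
--         elif extra == 1:
--             return rows, [base_items + 1, base_items, base_items]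
--         else:  # extra == 2
--             return rows, [base_items + 1, base_items + 1, base_items]
--
--     else:
--         # Four rows for 16+
--         rows = 4
--         base_items = punches_required // 4
--         extra = punches_required % 4
--
--         layout = [base_items] * 4
--         for i in range(extra):
--             layout[i] += 1
--
--         return rows, layout
-- ===== SOURCE B (Python) =====
-- def calculate_layout(punches_required: int):
--     """Peel rows greedily: each row takes the ceiling of what remains over rows left."""
--     rows = (1 if punches_required <= 5 else
--             2 if punches_required <= 10 else
--             3 if punches_required <= 15 else 4)
--
--     def deal(n, r):
--         if r <= 1:
--             return [n]
--         top = -(-n // r)  # ceiling division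
--         return [top] + deal(n - top, r - 1)
--
--     return rows, deal(punches_required, rows)
-- ===== Notes on version B (the rewrite author's own statement) =====
-- stated objective: alternative
-- what changed: B replaces A's per-branch quotient/remainder distributions by a recursive greedy peel: each row takes the ceiling of the remaining punches over the rows left, with no remainder/extras bookkeeping.
import Mathlib
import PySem

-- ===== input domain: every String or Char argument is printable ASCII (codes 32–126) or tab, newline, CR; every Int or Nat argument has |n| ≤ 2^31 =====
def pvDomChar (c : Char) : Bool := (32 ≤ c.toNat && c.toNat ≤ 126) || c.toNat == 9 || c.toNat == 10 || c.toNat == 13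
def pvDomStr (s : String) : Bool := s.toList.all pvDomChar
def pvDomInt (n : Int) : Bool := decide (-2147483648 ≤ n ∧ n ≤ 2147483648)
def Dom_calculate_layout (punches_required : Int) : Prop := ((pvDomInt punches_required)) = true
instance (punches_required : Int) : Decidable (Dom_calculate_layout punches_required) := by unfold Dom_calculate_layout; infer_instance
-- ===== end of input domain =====

-- B computes each row greedily as ceil(remaining/rows_left) by recursion instead of A's per-branch divmod distributions; objective: alternative.


-- ===== PORT A =====
-- Literal port of A. Float notes (exact on the admitted inputs): in the 6..10 branch punches_required
-- is positive, so int(punches_required / 2) = math.floor(punches_required / 2) = punches_required // 2 and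
-- math.ceil(punches_required / 2) = (punches_required + 1) // 2 (n/2 is an exact binary float for |n| ≤ 2^31).
-- layout[i] += 1 has 0 ≤ i < 4, ported via set/getD at i.toNat (exact: index in range, nonnegative).
def calculate_layout (punches_required : Int) : Int × List Int :=
  if punches_required ≤ 5 then
    (1, [punches_required])
  else if punches_required ≤ 10 then
    let rows : Int := 2
    if PySem.Int.mod punches_required 2 = 0 then
      (rows, [PySem.Int.floordiv punches_required 2, PySem.Int.floordiv punches_required 2])
    else
      (rows, [PySem.Int.floordiv (punches_required + 1) 2, PySem.Int.floordiv punches_required 2])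
  else if punches_required ≤ 15 then
    let rows : Int := 3
    let base_items := PySem.Int.floordiv punches_required 3
    let extra := PySem.Int.mod punches_required 3
    if extra = 0 then (rows, [base_items, base_items, base_items])
    else if extra = 1 then (rows, [base_items + 1, base_items, base_items])
    else (rows, [base_items + 1, base_items + 1, base_items])
  else
    let rows : Int := 4
    let base_items := PySem.Int.floordiv punches_required 4
    let extra := PySem.Int.mod punches_required 4
    let layout := (PySem.List.pyRange 0 extra 1).foldl
      (fun l i => l.set i.toNat (l.getD i.toNat 0 + 1)) (List.replicate 4 base_items)
    (rows, layout)

-- ===== PORT B =====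
-- Literal port of B's helper deal: recursive greedy peel, ceiling division -(-n // r).
def pyDeal (n r : Int) : List Int :=
  if _h : r ≤ 1 then [n]
  else
    let top := -(PySem.Int.floordiv (-n) r)
    top :: pyDeal (n - top) (r - 1)
termination_by r.toNat
decreasing_by omega

def calculate_layout_alt (punches_required : Int) : Int × List Int :=
  let rows : Int :=
    if punches_required ≤ 5 then 1
    else if punches_required ≤ 10 then 2
    else if punches_required ≤ 15 then 3
    else 4
  (rows, pyDeal punches_required rows)

-- ===== PRECONDITION & SPEC =====
def Spec_calculate_layout (punches_required : Int) (out : Int × List Int) : Prop := out = calculate_layout_alt punches_required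
instance (punches_required : Int) (out : Int × List Int) : Decidable (Spec_calculate_layout punches_required out) := by unfold Spec_calculate_layout; infer_instance

-- ===== CLAIM (what is proved, stated in full; the proofs are below) =====
def Claim_equal_calculate_layout : Prop := ∀ (punches_required : Int), Dom_calculate_layout punches_required → Spec_calculate_layout punches_required (calculate_layout punches_required)

-- ===== LEMMAS AND PROOFS =====
theorem pyDeal_one (n : Int) : pyDeal n 1 = [n] := by
  unfold pyDeal; simp

theorem pyDeal_step (n r : Int) (h : ¬ r ≤ 1) :
    pyDeal n r = -(PySem.Int.floordiv (-n) r) :: pyDeal (n + PySem.Int.floordiv (-n) r) (r - 1) := by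
  rw [pyDeal]; simp [h, sub_neg_eq_add]

-- ===== VERDICT (by name: the statement is the Claim_ definition above) =====
theorem calculate_layout_spec : Claim_equal_calculate_layout := by
  intro n _
  unfold Spec_calculate_layout calculate_layout calculate_layout_alt
  have hf : ∀ a : Int, ∀ b : Int, 0 < b → PySem.Int.floordiv a b = a / b := fun a b hb =>
    PySem.Int.floordiv_eq_ediv_of_pos hb
  have hm : ∀ a : Int, ∀ b : Int, 0 < b → PySem.Int.mod a b = a % b := fun a b hb =>
    PySem.Int.mod_eq_emod_of_pos hb
  have s21 : (2:Int) - 1 = 1 := by norm_num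
  have s32 : (3:Int) - 1 = 2 := by norm_num
  have s43 : (4:Int) - 1 = 3 := by norm_num
  by_cases h5 : n ≤ 5
  · simp [h5, pyDeal_one]
  · by_cases h10 : n ≤ 10
    · simp only [if_neg h5, if_pos h10]
      rw [pyDeal_step n 2 (by omega), s21, pyDeal_one]
      rw [hm n 2 (by omega), hf n 2 (by omega), hf (n+1) 2 (by omega), hf (-n) 2 (by omega)]
      have h2 : n % 2 = 0 ∨ n % 2 = 1 := Int.emod_two_eq_zero_or_one n
      rcases h2 with h | h <;> simp [h] <;> omega
    · by_cases h15 : n ≤ 15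
      · simp only [if_neg h5, if_neg h10, if_pos h15]
        rw [pyDeal_step n 3 (by omega), s32, pyDeal_step _ 2 (by omega), s21, pyDeal_one]
        rw [hm n 3 (by omega), hf n 3 (by omega), hf (-n) 3 (by omega),
            hf (-(n + (-n)/3)) 2 (by omega)]
        have h3 : n % 3 = 0 ∨ n % 3 = 1 ∨ n % 3 = 2 := by omega
        rcases h3 with h | h | h <;> simp [h] <;> refine ⟨by omega, by omega, by omega⟩
      · simp only [if_neg h5, if_neg h10, if_neg h15]
        rw [pyDeal_step n 4 (by omega), s43, pyDeal_step _ 3 (by omega), s32,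
            pyDeal_step _ 2 (by omega), s21, pyDeal_one]
        rw [hm n 4 (by omega), hf n 4 (by omega), hf (-n) 4 (by omega),
            hf (-(n + (-n)/4)) 3 (by omega),
            hf (-(n + (-n)/4 + (-(n + (-n)/4))/3)) 2 (by omega)]
        have h4 : n % 4 = 0 ∨ n % 4 = 1 ∨ n % 4 = 2 ∨ n % 4 = 3 := by omega
        have e0 : PySem.List.pyRange 0 (0 : Int) 1 = [] := by decide
        have e1 : PySem.List.pyRange 0 (1 : Int) 1 = [0] := by decide
        have e2 : PySem.List.pyRange 0 (2 : Int) 1 = [0, 1] := by decide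
        have e3 : PySem.List.pyRange 0 (3 : Int) 1 = [0, 1, 2] := by decide
        rcases h4 with h | h | h | h <;>
          simp [h, e0, e1, e2, e3, List.replicate, List.foldl, List.set, List.getD] <;>
          refine ⟨by omega, by omega, by omega, by omega⟩
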